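-- pv_equiv track=rewrite | github.com/Arj09/mca101_manisha | evil.py | evilNumber
-- ===== SOURCE A (Python) =====
-- def evilNumber(num):
-- 	count = 0
-- 	binnum  = bin(num)
-- 	length = len(binnum)
--
-- 	for i in range(2,length):
-- 		if binnum[i] == '1':
-- 			count += 1
--
-- 	if count % 2 == 0:
-- 		return True
-- 	else:
-- 		return False
-- ===== SOURCE B (Python) =====
-- def evilNumber(num):
-- 	n = abs(num)
-- 	count = 0
-- 	while n:
-- 		n &= n - 1
-- 		count += 1
-- 	return count % 2 == 0
-- ===== Notes on version B (the rewrite author's own statement) =====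
-- stated objective: idiomatic
-- what changed: Replaces building bin(num)'s string and scanning its characters with Brian Kernighan's bit-clearing loop (n &= n-1) on abs(num), counting only the set bits arithmetically.
import Mathlib
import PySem

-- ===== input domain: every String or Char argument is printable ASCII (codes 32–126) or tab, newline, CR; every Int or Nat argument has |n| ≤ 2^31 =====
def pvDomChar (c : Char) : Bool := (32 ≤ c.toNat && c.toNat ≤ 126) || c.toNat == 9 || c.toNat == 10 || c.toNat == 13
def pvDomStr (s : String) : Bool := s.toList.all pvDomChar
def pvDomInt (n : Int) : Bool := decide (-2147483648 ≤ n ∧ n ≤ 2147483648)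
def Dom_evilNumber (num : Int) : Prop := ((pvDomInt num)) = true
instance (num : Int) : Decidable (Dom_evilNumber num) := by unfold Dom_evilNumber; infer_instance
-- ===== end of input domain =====

-- B replaces A's bin()-string scan with Brian Kernighan's bit-clearing loop on abs(num) (idiomatic, no string built).


-- ===== PORT A =====
-- bin(num) → PySem.Int.toBinChars0b num (the char list of PySem.Int.pyBin num, via toList_pyBin);
-- the loop scans indices 2..length exactly like A; binnum[i] is always in range there, so pyGetD is exact.
def evilNumber (num : Int) : Bool :=
  let binnum : List Char := PySem.Int.toBinChars0b num
  let length : Int := (binnum.length : Int)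
  let count : Int :=
    (PySem.List.pyRange 2 length 1).foldl
      (fun c i => if PySem.List.pyGetD binnum i ' ' == '1' then c + 1 else c) 0
  if PySem.Int.mod count 2 == 0 then true else false

-- ===== PORT B =====
-- while n: n &= n - 1; count += 1   (terminates: n &&& (n - 1) < n for n ≠ 0)
def kernLoop (n : Nat) (count : Nat) : Nat :=
  if h : n = 0 then count
  else kernLoop (n &&& (n - 1)) (count + 1)
decreasing_by
  exact Nat.lt_of_le_of_lt Nat.and_le_right (by omega)

def evilNumber_alt (num : Int) : Bool :=
  let n := num.natAbs
  let count := kernLoop n 0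
  decide (count % 2 = 0)

-- ===== PRECONDITION & SPEC =====
def Spec_evilNumber (num : Int) (out : Bool) : Prop := out = evilNumber_alt num
instance (num : Int) (out : Bool) : Decidable (Spec_evilNumber num out) := by unfold Spec_evilNumber; infer_instance

-- ===== CLAIM (what is proved, stated in full; the proofs are below) =====
def Claim_equal_evilNumber : Prop := ∀ (num : Int), Dom_evilNumber num → Spec_evilNumber num (evilNumber num)

-- ===== LEMMAS AND PROOFS =====

-- recursive description of the binary digit list produced by Nat.toDigits 2
def binDigits (n : Nat) : List Char :=
  if n < 2 then [Nat.digitChar n]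
  else binDigits (n / 2) ++ [Nat.digitChar (n % 2)]

lemma toDigitsCore_eq_binDigits :
    ∀ (f n : Nat) (acc : List Char), n < f →
      Nat.toDigitsCore 2 f n acc = binDigits n ++ acc := by
  intro f
  induction f with
  | zero => intro n acc h; omega
  | succ f ih =>
    intro n acc h
    rw [Nat.toDigitsCore]
    by_cases h2 : n / 2 = 0
    · have hn2 : n < 2 := by omega
      rw [binDigits, if_pos hn2]
      simp [h2, Nat.mod_eq_of_lt hn2]
    · have hf : n / 2 < f := by omega
      rw [if_neg h2, ih (n / 2) _ hf]
      conv_rhs => rw [binDigits, if_neg (by omega : ¬ n < 2)]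
      simp

lemma toDigits_eq_binDigits (n : Nat) :
    Nat.toDigits 2 n = binDigits n := by
  have := toDigitsCore_eq_binDigits (n + 1) n [] (by omega)
  simpa [Nat.toDigits] using this

-- helper facts about bitCount under doubling
lemma bitCount_two_mul (m : Nat) :
    PySem.Int.bitCount ((2 * m : Nat) : Int) = PySem.Int.bitCount (m : Int) := by
  rcases Nat.eq_zero_or_pos m with h | h
  · subst h; decide
  · rw [PySem.Int.bitCount_natCast (by omega : 0 < 2 * m)]
    have h1 : (2 * m) % 2 = 0 := by omega
    have h2 : (2 * m) / 2 = m := by omega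
    rw [h1, h2]
    omega

lemma bitCount_two_mul_add_one (m : Nat) :
    PySem.Int.bitCount ((2 * m + 1 : Nat) : Int) = PySem.Int.bitCount (m : Int) + 1 := by
  rw [PySem.Int.bitCount_natCast (by omega : 0 < 2 * m + 1)]
  have h1 : (2 * m + 1) % 2 = 1 := by omega
  have h2 : (2 * m + 1) / 2 = m := by omega
  rw [h1, h2]
  omega

-- count of '1' characters among the binary digits is the bit count
lemma count_one_binDigits :
    ∀ n : Nat, (binDigits n).count '1' = PySem.Int.bitCount (n : Int) := by
  intro n
  induction n using Nat.strong_induction_on with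
  | _ n ih =>
    by_cases h : n < 2
    · interval_cases n <;> (rw [binDigits]; decide)
    · conv_lhs => rw [binDigits, if_neg h]
      have hlt2 : n / 2 < n := Nat.div_lt_self (by omega) (by omega)
      rw [List.count_append, ih (n / 2) hlt2]
      rw [PySem.Int.bitCount_natCast (by omega : 0 < n)]
      rcases Nat.mod_two_eq_zero_or_one n with h0 | h1
      · rw [h0]
        simp [Nat.digitChar]
      · rw [h1]
        simp [Nat.digitChar]
        omega

-- the two Kernighan bit-clearing identities
lemma land_two_mul_add_one (k : Nat) : (2 * k + 1) &&& (2 * k) = 2 * k := by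
  apply Nat.eq_of_testBit_eq
  intro i
  cases i with
  | zero =>
    simp [Nat.testBit_zero]
  | succ i =>
    rw [Nat.testBit_land]
    simp only [Nat.testBit_succ]
    have h1 : (2 * k + 1) / 2 = k := by omega
    have h2 : (2 * k) / 2 = k := by omega
    rw [h1, h2, Bool.and_self]

lemma land_two_mul_pred (k : Nat) (hk : 0 < k) :
    (2 * k) &&& (2 * k - 1) = 2 * (k &&& (k - 1)) := by
  apply Nat.eq_of_testBit_eq
  intro i
  cases i with
  | zero =>
    simp [Nat.testBit_zero]
  | succ i =>
    rw [Nat.testBit_land]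
    simp only [Nat.testBit_succ]
    have h1 : (2 * k) / 2 = k := by omega
    have h2 : (2 * k - 1) / 2 = k - 1 := by omega
    have h3 : 2 * (k &&& (k - 1)) / 2 = k &&& (k - 1) := by omega
    rw [h1, h2, h3, Nat.testBit_land]

-- clearing the lowest set bit removes exactly one from the bit count
lemma bitCount_land_pred :
    ∀ k : Nat, 0 < k →
      PySem.Int.bitCount (k : Int) = PySem.Int.bitCount ((k &&& (k - 1) : Nat) : Int) + 1 := by
  intro k
  induction k using Nat.strong_induction_on with
  | _ k ih =>
    intro hk
    rcases Nat.even_or_odd k with he | ho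
    · obtain ⟨j, hj⟩ := he
      have hj' : k = 2 * j := by omega
      subst hj'
      have hjpos : 0 < j := by omega
      rw [land_two_mul_pred j hjpos, bitCount_two_mul, bitCount_two_mul, ih j (by omega) hjpos]
    · obtain ⟨j, hj⟩ := ho
      subst hj
      have hl : (2 * j + 1) &&& (2 * j + 1 - 1) = 2 * j := by
        simpa using land_two_mul_add_one j
      rw [hl, bitCount_two_mul, bitCount_two_mul_add_one]

-- the Kernighan loop computes the bit count
lemma kernLoop_eq :
    ∀ n c : Nat, kernLoop n c = c + PySem.Int.bitCount (n : Int) := by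
  intro n
  induction n using Nat.strong_induction_on with
  | _ n ih =>
    intro c
    by_cases h : n = 0
    · subst h; rw [kernLoop]; simp
    · rw [kernLoop, dif_neg h]
      have hlt : n &&& (n - 1) < n :=
        Nat.lt_of_le_of_lt Nat.and_le_right (by omega)
      rw [ih _ hlt, bitCount_land_pred n (by omega)]
      omega

-- A's index scan counts the '1' characters of the list with its first two characters dropped
lemma countP_pyRange_drop :
    ∀ (l : List Char) (s : Nat), s ≤ l.length →
      List.countP (fun i => PySem.List.pyGetD l i ' ' == '1')
        (PySem.List.pyRange (s : Int) (l.length : Int) 1)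
        = (l.drop s).count '1' := by
  intro l s hs
  induction hd : l.length - s generalizing s with
  | zero =>
    have : s = l.length := by omega
    subst this
    simp [PySem.List.pyRange, List.drop_length]
  | succ k ih =>
    have hslt : s < l.length := by omega
    rw [PySem.List.pyRange_one_cons (by exact_mod_cast hslt)]
    rw [List.countP_cons]
    have hcast : ((s : Int) + 1) = ((s + 1 : Nat) : Int) := by push_cast; ring
    rw [hcast, ih (s + 1) (by omega) (by omega)]
    rw [PySem.List.pyGetD_eq_getElem l ' ' (by positivity) (by exact_mod_cast hslt)]
    rw [List.drop_eq_getElem_cons hslt, List.count_cons]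
    simp [Int.toNat_natCast, List.count_eq_countP]

-- scanning indices 2.. of a '1'-free two-or-three-char prefix followed by the binary digits
lemma countP_prefix_toDigits (pre : List Char) (m : Nat)
    (hpre : 2 ≤ pre.length) (hnot : '1' ∉ pre) :
    List.countP (fun i => PySem.List.pyGetD (pre ++ Nat.toDigits 2 m) i ' ' == '1')
      (PySem.List.pyRange 2 (((pre ++ Nat.toDigits 2 m).length : Nat) : Int) 1)
      = PySem.Int.bitCount (m : Int) := by
  have h2 : (2 : Int) = ((2 : Nat) : Int) := rfl
  have hlen : 2 ≤ (pre ++ Nat.toDigits 2 m).length := by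
    rw [List.length_append]; omega
  rw [h2, countP_pyRange_drop _ 2 hlen]
  rw [List.drop_append_of_le_length (by omega), List.count_append]
  have hz : (pre.drop 2).count '1' = 0 := by
    rw [List.count_eq_zero]
    intro hmem
    exact hnot (List.mem_of_mem_drop hmem)
  rw [hz, toDigits_eq_binDigits, count_one_binDigits]
  omega

-- A's result in closed form: parity of the bit count of |num|
lemma evilNumber_eq (num : Int) :
    evilNumber num = decide (PySem.Int.bitCount ((num.natAbs : Nat) : Int) % 2 = 0) := by
  unfold evilNumber
  dsimp only
  rw [PySem.List.foldl_count_if]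
  by_cases hneg : num < 0
  · have hb : PySem.Int.toBinChars0b num = ['-', '0', 'b'] ++ Nat.toDigits 2 num.natAbs := by
      rw [PySem.Int.toBinChars0b, if_pos hneg]
      rfl
    rw [hb, countP_prefix_toDigits ['-', '0', 'b'] num.natAbs (by decide) (by decide)]
    rw [PySem.Int.mod_eq_emod_of_pos (by omega)]
    simp
    omega
  · have habs : num.natAbs = num.toNat := by omega
    have hb : PySem.Int.toBinChars0b num = ['0', 'b'] ++ Nat.toDigits 2 num.toNat := by
      rw [PySem.Int.toBinChars0b, if_neg hneg]
      rfl
    rw [hb, countP_prefix_toDigits ['0', 'b'] num.toNat (by decide) (by decide), habs]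
    rw [PySem.Int.mod_eq_emod_of_pos (by omega)]
    simp
    omega

-- ===== VERDICT (by name: the statement is the Claim_ definition above) =====
theorem evilNumber_spec : Claim_equal_evilNumber := by
  intro num _
  unfold Spec_evilNumber evilNumber_alt
  dsimp only
  rw [evilNumber_eq, kernLoop_eq]
  simp
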